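-- pv_equiv track=rewrite | github.com/Akselas/TDA_TP_INTEGRADOR | tp2/algoritmo_i_j.py | max_acumulados_sophia
-- ===== SOURCE A (Python) =====
-- def maximo_tras_eleccion_mateo(monedas, maximos, i, j):
--     if monedas[i] >= monedas[j] and i != len(monedas)-1:
--         return maximos[i+1][j]
--     else:
--         return maximos[i][j-1]
--
-- def max_acumulados_sophia(monedas):
--     n = len(monedas)
--
--     max_acumulados =[[0] * n for _ in range(n)]
--
--     if n % 2 != 0:
--         for i in range(n):
--             max_acumulados[i][i] = monedas[i]
--
--     if n % 2 == 0:
--         start = 1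
--     else:
--         start = 2
--
--     for diag in range(start, n, 2):
--         for i in range(n - diag):
--             j = i + diag
--             max_acumulado_eligiendo_i = monedas[i] + maximo_tras_eleccion_mateo(monedas, max_acumulados, i+1, j)
--             max_acumulado_eligiendo_j = monedas[j] + maximo_tras_eleccion_mateo(monedas, max_acumulados, i, j-1)
--             max_acumulados[i][j] = max(max_acumulado_eligiendo_i, max_acumulado_eligiendo_j)
--
--     return max_acumulados
-- ===== SOURCE B (Python) =====
-- def max_acumulados_sophia(monedas):
--     n = len(monedas)
--     memo = {}
--
--     def valor(i, j):
--         # optimal accumulation for the interval (i, j); gaps below the base read as 0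
--         if j < i:
--             return 0
--         if i == j:
--             return monedas[i]
--         if (i, j) not in memo:
--             def tras(p, q):
--                 # the interval left after Mateo's (deterministic) reply
--                 if monedas[p] >= monedas[q] and p != n - 1:
--                     return (p + 1, q)
--                 return (p, q - 1)
--             memo[(i, j)] = max(monedas[i] + valor(*tras(i + 1, j)),
--                                monedas[j] + valor(*tras(i, j - 1)))
--         return memo[(i, j)]
--
--     return [[valor(i, j) if i <= j and (j - i) % 2 != n % 2 else 0
--              for j in range(n)]
--             for i in range(n)]
-- ===== Notes on version B (the rewrite author's own statement) =====
-- stated objective: alternative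
-- what changed: B replaces A's bottom-up diagonal-by-diagonal table fill by demand-driven top-down memoized recursion: a recursive valor(i,j) with a dict memo keyed by (i,j) encodes the same game recurrence, and the returned matrix is assembled by a comprehension that calls the recursion only on the valid-parity upper-triangle cells and writes 0 elsewhere.
import Mathlib
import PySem

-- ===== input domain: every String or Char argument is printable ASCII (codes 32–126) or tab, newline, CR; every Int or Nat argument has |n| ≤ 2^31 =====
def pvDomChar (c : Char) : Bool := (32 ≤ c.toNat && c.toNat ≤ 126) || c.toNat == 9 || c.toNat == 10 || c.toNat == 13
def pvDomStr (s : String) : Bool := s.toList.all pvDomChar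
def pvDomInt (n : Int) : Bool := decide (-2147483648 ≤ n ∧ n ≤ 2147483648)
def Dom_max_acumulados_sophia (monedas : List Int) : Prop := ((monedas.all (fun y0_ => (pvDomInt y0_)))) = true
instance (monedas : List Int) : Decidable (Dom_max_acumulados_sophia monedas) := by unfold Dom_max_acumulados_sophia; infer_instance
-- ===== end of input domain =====

-- B computes A's game table by demand-driven top-down memoized recursion (dict memo keyed
-- by (i,j)) instead of A's bottom-up in-place diagonal-by-diagonal matrix fill;
-- objective: alternative decomposition, same O(n^2) cost.


-- ===== PORT A =====
def pvGetCell (t : List (List Int)) (i j : Int) : Int :=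
  PySem.List.pyGetD (PySem.List.pyGetD t i []) j 0

def pvSetCell (t : List (List Int)) (i j : Int) (v : Int) : List (List Int) :=
  PySem.List.pySetD t i (PySem.List.pySetD (PySem.List.pyGetD t i []) j v)

def maximo_tras_eleccion_mateo (monedas : List Int) (maximos : List (List Int)) (i j : Int) : Int :=
  if PySem.List.pyGetD monedas i 0 ≥ PySem.List.pyGetD monedas j 0 ∧ i ≠ (monedas.length : Int) - 1 then
    pvGetCell maximos (i + 1) j
  else
    pvGetCell maximos i (j - 1)

def max_acumulados_sophia (monedas : List Int) : List (List Int) :=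
  let n : Int := monedas.length
  let t0 : List (List Int) := List.replicate monedas.length (List.replicate monedas.length (0 : Int))
  let t1 : List (List Int) :=
    if n % 2 ≠ 0 then
      (PySem.List.pyRange 0 n 1).foldl
        (fun t i => pvSetCell t i i (PySem.List.pyGetD monedas i 0)) t0
    else t0
  let start : Int := if n % 2 == 0 then 1 else 2
  (PySem.List.pyRange start n 2).foldl (fun t diag =>
    (PySem.List.pyRange 0 (n - diag) 1).foldl (fun t i =>
      let j := i + diag
      let ci := PySem.List.pyGetD monedas i 0 + maximo_tras_eleccion_mateo monedas t (i + 1) j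
      let cj := PySem.List.pyGetD monedas j 0 + maximo_tras_eleccion_mateo monedas t i (j - 1)
      pvSetCell t i j (max ci cj)) t) t1

-- ===== PORT B =====
-- the interval left after Mateo's (deterministic) reply
def pvTras (monedas : List Int) (n p q : Int) : Int × Int :=
  if PySem.List.pyGetD monedas p 0 ≥ PySem.List.pyGetD monedas q 0 ∧ p ≠ n - 1 then (p + 1, q)
  else (p, q - 1)

-- cited by pvValor's decreasing_by: both branches of pvTras shrink the gap
theorem pvTras_gap (monedas : List Int) (n p q : Int) :
    (pvTras monedas n p q).2 - (pvTras monedas n p q).1 = q - p - 1 := by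
  unfold pvTras; split <;> simp <;> ring

-- optimal accumulation for interval (i, j), memo threaded as state (Python's mutable dict)
def pvValor (monedas : List Int) (n : Int) (memo : PySem.Dict (Int × Int) Int) (i j : Int) :
    Int × PySem.Dict (Int × Int) Int :=
  if j < i then (0, memo)
  else if i = j then (PySem.List.pyGetD monedas i 0, memo)
  else
    match memo.get? (i, j) with
    | some v => (v, memo)
    | none =>
        let pq1 := pvTras monedas n (i + 1) j
        let r1 := pvValor monedas n memo pq1.1 pq1.2
        let pq2 := pvTras monedas n i (j - 1)
        let r2 := pvValor monedas n r1.2 pq2.1 pq2.2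
        let v := max (PySem.List.pyGetD monedas i 0 + r1.1)
                     (PySem.List.pyGetD monedas j 0 + r2.1)
        (v, r2.2.insert (i, j) v)
termination_by (j - i).toNat
decreasing_by
  · have h1 := pvTras_gap monedas n (i + 1) j
    omega
  · have h2 := pvTras_gap monedas n i (j - 1)
    omega

def max_acumulados_sophia_alt (monedas : List Int) : List (List Int) :=
  let n : Int := monedas.length
  ((PySem.List.pyRange 0 n 1).foldl
    (fun (st : List (List Int) × PySem.Dict (Int × Int) Int) i =>
      let row := (PySem.List.pyRange 0 n 1).foldl
        (fun (st2 : List Int × PySem.Dict (Int × Int) Int) j =>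
          if i ≤ j ∧ PySem.Int.mod (j - i) 2 ≠ PySem.Int.mod n 2 then
            let r := pvValor monedas n st2.2 i j
            (st2.1 ++ [r.1], r.2)
          else (st2.1 ++ [(0 : Int)], st2.2))
        ([], st.2)
      (st.1 ++ [row.1], row.2))
    ([], PySem.Dict.empty)).1

-- ===== PRECONDITION & SPEC =====
def Spec_max_acumulados_sophia (monedas : List Int) (out : List (List Int)) : Prop := out = max_acumulados_sophia_alt monedas
instance (monedas : List Int) (out : List (List Int)) : Decidable (Spec_max_acumulados_sophia monedas out) := by unfold Spec_max_acumulados_sophia; infer_instance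

-- ===== CLAIM (what is proved, stated in full; the proofs are below) =====
def Claim_equal_max_acumulados_sophia : Prop := ∀ (monedas : List Int), Dom_max_acumulados_sophia monedas → Spec_max_acumulados_sophia monedas (max_acumulados_sophia monedas)

-- ===== LEMMAS AND PROOFS =====

-- Common description of the filled table: pvSpecD m d i is the value of cell (i, i+d)
-- on a filled diagonal, defined by the recurrence both programs implement.
def pvAfterRow (m : List Int) (p q : Nat) : Nat :=
  if m.getD p 0 ≥ m.getD q 0 ∧ p ≠ m.length - 1 then p + 1 else p

def pvSpecD (m : List Int) : Nat → Nat → Int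
  | 0, i => m.getD i 0
  | 1, i => max (m.getD i 0 + 0) (m.getD (i + 1) 0 + 0)
  | (d + 2), i =>
      max (m.getD i 0 + pvSpecD m d (pvAfterRow m (i + 1) (i + d + 2)))
          (m.getD (i + d + 2) 0 + pvSpecD m d (pvAfterRow m i (i + d + 1)))

def pvCell (m : List Int) (bound : Nat) (i j : Nat) : Int :=
  if i ≤ j ∧ (j - i) % 2 ≠ m.length % 2 ∧ j - i < bound then pvSpecD m (j - i) i else 0

def pvMk (n : Nat) (f : Nat → Nat → Int) : List (List Int) :=
  (List.range n).map (fun i => (List.range n).map (f i))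

def pvStartN (m : List Int) : Nat := if m.length % 2 = 0 then 1 else 2

def pvK (m : List Int) : Nat :=
  if pvStartN m < m.length then (m.length - pvStartN m + 1) / 2 else 0

-- arithmetic facts about the diagonal schedule
lemma pvStart_par (m : List Int) : pvStartN m % 2 ≠ m.length % 2 := by
  unfold pvStartN; split <;> omega

lemma pv_bound_lt (m : List Int) {k : Nat} (hk : k < pvK m) :
    pvStartN m + 2 * k < m.length := by
  unfold pvK at hk; by_cases h : pvStartN m < m.length <;> simp [h] at hk <;> omega

-- every in-range upper cell's gap lies under the schedule's bound
lemma pv_gap_lt (m : List Int) {i j : Nat} (hij : i ≤ j) (hj : j < m.length) :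
    j - i < pvStartN m + 2 * pvK m := by
  unfold pvK pvStartN
  split_ifs <;> omega

-- the step-2 range as a mapped List.range
lemma pv_range2 (m : List Int) :
    PySem.List.pyRange (pvStartN m) (m.length) 2 =
      (List.range (pvK m)).map (fun k => ((pvStartN m + 2 * k : Nat) : Int)) := by
  rw [PySem.List.pyRange_of_pos _ _ (by norm_num : (0:Int) < 2)]
  unfold pvK
  by_cases h : pvStartN m < m.length
  · rw [if_pos h, if_pos (by exact_mod_cast h)]
    have hcount : (((m.length : Int) - (pvStartN m : Int) + 2 - 1) / 2).toNat
        = (m.length - pvStartN m + 1) / 2 := by omega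
    rw [hcount]
    refine List.map_congr_left ?_
    intro k _
    push_cast
    ring
  · rw [if_neg h, if_neg (by exact_mod_cast h)]
    simp

-- pySetD at a (cast) in-range natural index is List.set
lemma pv_pySetD_natCast {α : Type} (xs : List α) (p : Nat) (v : α) (h : p < xs.length) :
    PySem.List.pySetD xs (p : Int) v = xs.set p v := by
  have h0 : (0:Int) ≤ (p : Int) := Int.natCast_nonneg p
  have h1 : (p : Int) < (xs.length : Int) := by exact_mod_cast h
  simp [PySem.List.pySetD, PySem.List.pySet?, PySem.List.pyIdx?, h0, h1]

lemma pvMk_congr {n : Nat} {f g : Nat → Nat → Int}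
    (h : ∀ a b, a < n → b < n → f a b = g a b) : pvMk n f = pvMk n g := by
  unfold pvMk
  refine List.map_congr_left ?_
  intro a ha
  refine List.map_congr_left ?_
  intro b hb
  exact h a b (List.mem_range.mp ha) (List.mem_range.mp hb)

lemma pvGetCell_mk {n : Nat} (f : Nat → Nat → Int) {p q : Nat} (hp : p < n) (hq : q < n) :
    pvGetCell (pvMk n f) (p : Int) (q : Int) = f p q := by
  unfold pvGetCell pvMk
  rw [PySem.List.pyGetD_natCast, PySem.List.pyGetD_natCast,
    PySem.List.getD_map_range _ _ _ _ hp, PySem.List.getD_map_range _ _ _ _ hq]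

lemma pvSetCell_mk {n : Nat} (f : Nat → Nat → Int) {p q : Nat} (hp : p < n) (hq : q < n) (v : Int) :
    pvSetCell (pvMk n f) (p : Int) (q : Int) v =
      pvMk n (fun a b => if a = p ∧ b = q then v else f a b) := by
  unfold pvSetCell pvMk
  rw [PySem.List.pyGetD_natCast, PySem.List.getD_map_range _ _ _ _ hp,
    pv_pySetD_natCast _ _ _ (by simpa using hp),
    pv_pySetD_natCast _ _ _ (by simpa using hq)]
  apply List.ext_getElem (by simp)
  intro a ha1 ha2
  simp only [List.getElem_set, List.getElem_map, List.getElem_range] at *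
  by_cases hap : p = a
  · subst hap
    rw [if_pos rfl]
    apply List.ext_getElem (by simp)
    intro b hb1 hb2
    simp only [List.getElem_set, List.getElem_map, List.getElem_range] at *
    by_cases hbq : q = b
    · subst hbq; simp
    · rw [if_neg hbq, if_neg (by tauto)]
  · rw [if_neg hap]
    apply List.ext_getElem (by simp)
    intro b hb1 hb2
    simp only [List.getElem_map, List.getElem_range] at *
    rw [if_neg (by tauto)]

-- evaluate the helper at natural-number points (the length must be positive)
lemma pv_mateo_nat (m : List Int) (t : List (List Int)) (p q : Nat) (h1 : 1 ≤ m.length) :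
    maximo_tras_eleccion_mateo m t (p : Int) (q : Int) =
      if m.getD p 0 ≥ m.getD q 0 ∧ p ≠ m.length - 1 then pvGetCell t ((p + 1 : Nat) : Int) (q : Int)
      else pvGetCell t (p : Int) ((q : Int) - 1) := by
  unfold maximo_tras_eleccion_mateo
  simp only [PySem.List.pyGetD_natCast]
  have hcond : ((p : Int) ≠ (m.length : Int) - 1) ↔ (p ≠ m.length - 1) := by omega
  have e1 : ((p : Int) + 1) = ((p + 1 : Nat) : Int) := by push_cast; ring
  rw [e1]
  by_cases hc : m.getD p 0 ≥ m.getD q 0 ∧ p ≠ m.length - 1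
  · rw [if_pos ⟨hc.1, hcond.mpr hc.2⟩, if_pos hc]
  · rw [if_neg (fun h => hc ⟨h.1, hcond.mp h.2⟩), if_neg hc]

lemma pvCell_below (m : List Int) (d a b : Nat) (h : b < a) : pvCell m d a b = 0 := by
  unfold pvCell; rw [if_neg (by omega)]

lemma pvCell_at (m : List Int) (d a b : Nat) (hab : a ≤ b)
    (hpar : (b - a) % 2 ≠ m.length % 2) (hlt : b - a < d) :
    pvCell m d a b = pvSpecD m (b - a) a := by
  unfold pvCell; rw [if_pos ⟨hab, hpar, hlt⟩]

-- the two mateo-reads of one cell update evaluate to the spec recurrence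
lemma pv_cell_step (m : List Int) (hfun : Nat → Nat → Int) (d i : Nat)
    (hd : 1 ≤ d) (hp : d % 2 ≠ m.length % 2) (hin : i + d < m.length)
    (Hlow : ∀ a b, a < m.length → b < m.length → b < a + d → hfun a b = pvCell m d a b) :
    max (PySem.List.pyGetD m (i : Int) 0 +
          maximo_tras_eleccion_mateo m (pvMk m.length hfun) ((i : Int) + 1) ((i + d : Nat) : Int))
        (PySem.List.pyGetD m ((i + d : Nat) : Int) 0 +
          maximo_tras_eleccion_mateo m (pvMk m.length hfun) (i : Int) (((i + d : Nat) : Int) - 1))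
      = pvSpecD m d i := by
  have hn1 : 1 ≤ m.length := by omega
  have hT : ∀ a b : Nat, a < m.length → b < m.length → b < a + d →
      pvGetCell (pvMk m.length hfun) (a : Int) (b : Int) = pvCell m d a b := by
    intro a b ha hb hba
    rw [pvGetCell_mk hfun ha hb, Hlow a b ha hb hba]
  have e1 : ((i : Int) + 1) = ((i + 1 : Nat) : Int) := by push_cast; ring
  rw [e1, pv_mateo_nat m _ (i + 1) (i + d) hn1]
  rcases Nat.lt_or_ge d 2 with h2 | h2
  · have hd1 : d = 1 := by omega
    subst hd1
    have e2 : (((i + 1 : Nat) : Int) - 1) = (i : Int) := by push_cast; ring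
    rw [e2, pv_mateo_nat m _ i i hn1]
    rw [if_pos (show m.getD i 0 ≥ m.getD i 0 ∧ i ≠ m.length - 1 from ⟨le_refl _, by omega⟩)]
    rw [hT (i + 1) i (by omega) (by omega) (by omega), pvCell_below m _ _ _ (by omega)]
    by_cases hc : i + 1 = m.length - 1
    · rw [if_neg (show ¬(m.getD (i + 1) 0 ≥ m.getD (i + 1) 0 ∧ i + 1 ≠ m.length - 1) from
        fun hh => hh.2 hc)]
      simp only [PySem.List.pyGetD_natCast]
      rfl
    · rw [if_pos (show m.getD (i + 1) 0 ≥ m.getD (i + 1) 0 ∧ i + 1 ≠ m.length - 1 from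
        ⟨le_refl _, hc⟩)]
      rw [hT (i + 1 + 1) (i + 1) (by omega) (by omega) (by omega),
        pvCell_below m _ _ _ (by omega)]
      simp only [PySem.List.pyGetD_natCast]
      rfl
  · obtain ⟨e, rfl⟩ : ∃ e, d = e + 2 := ⟨d - 2, by omega⟩
    simp only [show i + (e + 2) = i + e + 2 from rfl]
    have hne1 : i + 1 ≠ m.length - 1 := by omega
    have hnei : i ≠ m.length - 1 := by omega
    have e3 : (((i + e + 2 : Nat) : Int) - 1) = ((i + e + 1 : Nat) : Int) := by push_cast; ring
    rw [e3, pv_mateo_nat m _ i (i + e + 1) hn1]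
    have hrhs : pvSpecD m (e + 2) i =
        max (m.getD i 0 + pvSpecD m e (pvAfterRow m (i + 1) (i + e + 2)))
            (m.getD (i + e + 2) 0 + pvSpecD m e (pvAfterRow m i (i + e + 1))) := rfl
    rw [hrhs]
    unfold pvAfterRow
    by_cases hc1 : m.getD (i + 1) 0 ≥ m.getD (i + e + 2) 0
    · rw [if_pos (show m.getD (i + 1) 0 ≥ m.getD (i + e + 2) 0 ∧ i + 1 ≠ m.length - 1 from
          ⟨hc1, hne1⟩),
        if_pos (show m.getD (i + 1) 0 ≥ m.getD (i + e + 2) 0 ∧ i + 1 ≠ m.length - 1 from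
          ⟨hc1, hne1⟩)]
      rw [hT (i + 1 + 1) (i + e + 2) (by omega) (by omega) (by omega)]
      rw [pvCell_at m _ _ _ (by omega) (by omega) (by omega)]
      rw [show i + e + 2 - (i + 1 + 1) = e from by omega]
      by_cases hc2 : m.getD i 0 ≥ m.getD (i + e + 1) 0
      · rw [if_pos (show m.getD i 0 ≥ m.getD (i + e + 1) 0 ∧ i ≠ m.length - 1 from ⟨hc2, hnei⟩),
          if_pos (show m.getD i 0 ≥ m.getD (i + e + 1) 0 ∧ i ≠ m.length - 1 from ⟨hc2, hnei⟩)]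
        rw [hT (i + 1) (i + e + 1) (by omega) (by omega) (by omega)]
        rw [pvCell_at m _ _ _ (by omega) (by omega) (by omega)]
        rw [show i + e + 1 - (i + 1) = e from by omega]
        simp only [PySem.List.pyGetD_natCast]
      · rw [if_neg (show ¬(m.getD i 0 ≥ m.getD (i + e + 1) 0 ∧ i ≠ m.length - 1) from
            fun hh => hc2 hh.1),
          if_neg (show ¬(m.getD i 0 ≥ m.getD (i + e + 1) 0 ∧ i ≠ m.length - 1) from
            fun hh => hc2 hh.1)]
        rw [show (((i + e + 1 : Nat) : Int) - 1) = ((i + e : Nat) : Int) from by push_cast; ring]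
        rw [hT i (i + e) (by omega) (by omega) (by omega)]
        rw [pvCell_at m _ _ _ (by omega) (by omega) (by omega)]
        rw [show i + e - i = e from by omega]
        simp only [PySem.List.pyGetD_natCast]
    · rw [if_neg (show ¬(m.getD (i + 1) 0 ≥ m.getD (i + e + 2) 0 ∧ i + 1 ≠ m.length - 1) from
          fun hh => hc1 hh.1),
        if_neg (show ¬(m.getD (i + 1) 0 ≥ m.getD (i + e + 2) 0 ∧ i + 1 ≠ m.length - 1) from
          fun hh => hc1 hh.1)]
      rw [hT (i + 1) (i + e + 1) (by omega) (by omega) (by omega)]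
      rw [pvCell_at m _ _ _ (by omega) (by omega) (by omega)]
      rw [show i + e + 1 - (i + 1) = e from by omega]
      by_cases hc2 : m.getD i 0 ≥ m.getD (i + e + 1) 0
      · rw [if_pos (show m.getD i 0 ≥ m.getD (i + e + 1) 0 ∧ i ≠ m.length - 1 from ⟨hc2, hnei⟩),
          if_pos (show m.getD i 0 ≥ m.getD (i + e + 1) 0 ∧ i ≠ m.length - 1 from ⟨hc2, hnei⟩)]
        simp only [PySem.List.pyGetD_natCast]
      · rw [if_neg (show ¬(m.getD i 0 ≥ m.getD (i + e + 1) 0 ∧ i ≠ m.length - 1) from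
            fun hh => hc2 hh.1),
          if_neg (show ¬(m.getD i 0 ≥ m.getD (i + e + 1) 0 ∧ i ≠ m.length - 1) from
            fun hh => hc2 hh.1)]
        rw [show (((i + e + 1 : Nat) : Int) - 1) = ((i + e : Nat) : Int) from by push_cast; ring]
        rw [hT i (i + e) (by omega) (by omega) (by omega)]
        rw [pvCell_at m _ _ _ (by omega) (by omega) (by omega)]
        rw [show i + e - i = e from by omega]
        simp only [PySem.List.pyGetD_natCast]

-- the partially-filled diagonal during the inner loop
def pvG (m : List Int) (d k : Nat) : Nat → Nat → Int := fun a b =>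
  if a < k ∧ b = a + d then pvSpecD m d a else pvCell m d a b

-- one full inner loop (one diagonal) on the A side
lemma pv_inner (m : List Int) (d : Nat) (hd : 1 ≤ d) (hdn : d < m.length)
    (hp : d % 2 ≠ m.length % 2) :
    (PySem.List.pyRange 0 ((m.length : Int) - (d : Int)) 1).foldl (fun t i =>
        let j := i + (d : Int)
        let ci := PySem.List.pyGetD m i 0 + maximo_tras_eleccion_mateo m t (i + 1) j
        let cj := PySem.List.pyGetD m j 0 + maximo_tras_eleccion_mateo m t i (j - 1)
        pvSetCell t i j (max ci cj)) (pvMk m.length (pvCell m d))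
      = pvMk m.length (pvCell m (d + 2)) := by
  have e1 : ((m.length : Int) - (d : Int)) = ((m.length - d : Nat) : Int) := by omega
  rw [e1, PySem.List.pyRange_one, List.foldl_map]
  have e2 : (((m.length - d : Nat) : Int) - 0).toNat = m.length - d := by omega
  rw [e2]
  simp only [zero_add]
  have cast_ad : ∀ a : Nat, (a : Int) + (d : Int) = ((a + d : Nat) : Int) := by
    intro a; push_cast; ring
  simp only [cast_ad]
  have aux : ∀ k, k ≤ m.length - d →
      (List.range k).foldl (fun t (a : Nat) =>
          pvSetCell t (a : Int) ((a + d : Nat) : Int)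
            (max (PySem.List.pyGetD m (a : Int) 0 +
                    maximo_tras_eleccion_mateo m t ((a : Int) + 1) ((a + d : Nat) : Int))
                 (PySem.List.pyGetD m ((a + d : Nat) : Int) 0 +
                    maximo_tras_eleccion_mateo m t (a : Int) (((a + d : Nat) : Int) - 1))))
        (pvMk m.length (pvCell m d)) = pvMk m.length (pvG m d k) := by
    intro k
    induction k with
    | zero =>
      intro _
      simp only [List.range_zero, List.foldl_nil]
      refine pvMk_congr ?_
      intro a b _ _
      unfold pvG
      rw [if_neg (by omega)]
    | succ k ih =>
      intro hk
      rw [List.range_succ, List.foldl_append, ih (by omega), List.foldl_cons, List.foldl_nil]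
      have Hlow : ∀ a b, a < m.length → b < m.length → b < a + d →
          pvG m d k a b = pvCell m d a b := by
        intro a b _ _ hba
        unfold pvG
        rw [if_neg (by omega)]
      rw [pv_cell_step m (pvG m d k) d k hd hp (by omega) Hlow]
      rw [pvSetCell_mk _ (by omega) (by omega)]
      refine pvMk_congr ?_
      intro a b ha hb
      by_cases h1 : a = k ∧ b = k + d
      · obtain ⟨rfl, rfl⟩ := h1
        rw [if_pos ⟨rfl, rfl⟩]
        unfold pvG
        rw [if_pos (by omega)]
      · rw [if_neg h1]
        unfold pvG
        by_cases h2 : a < k ∧ b = a + d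
        · rw [if_pos h2, if_pos (by omega)]
        · rw [if_neg h2, if_neg (by omega)]
  rw [aux (m.length - d) le_rfl]
  refine pvMk_congr ?_
  intro a b ha hb
  unfold pvG
  by_cases h1 : a < m.length - d ∧ b = a + d
  · obtain ⟨h1a, rfl⟩ := h1
    rw [if_pos ⟨h1a, rfl⟩]
    unfold pvCell
    rw [if_pos (by omega)]
    have g1 : a + d - a = d := by omega
    rw [g1]
  · rw [if_neg h1]
    unfold pvCell
    by_cases h2 : a ≤ b ∧ (b - a) % 2 ≠ m.length % 2 ∧ b - a < d
    · rw [if_pos h2, if_pos ⟨h2.1, h2.2.1, by omega⟩]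
    · rw [if_neg h2, if_neg (by omega)]

lemma pv_rep_zero (m : List Int) :
    List.replicate m.length (List.replicate m.length (0 : Int)) = pvMk m.length (fun _ _ => 0) := by
  unfold pvMk
  apply List.ext_getElem (by simp)
  intro a h1 h2
  simp only [List.getElem_replicate, List.getElem_map, List.getElem_range]
  apply List.ext_getElem (by simp)
  intro b hb1 hb2
  simp

-- the initial table (zeros, plus the diagonal when n is odd)
lemma pv_init (m : List Int) :
    (if (m.length : Int) % 2 ≠ 0 then
        (PySem.List.pyRange 0 (m.length : Int) 1).foldl
          (fun t i => pvSetCell t i i (PySem.List.pyGetD m i 0))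
          (List.replicate m.length (List.replicate m.length (0 : Int)))
      else List.replicate m.length (List.replicate m.length (0 : Int)))
      = pvMk m.length (pvCell m (pvStartN m)) := by
  by_cases h : m.length % 2 = 0
  · rw [if_neg (by omega), pv_rep_zero]
    refine pvMk_congr ?_
    intro a b ha hb
    unfold pvCell pvStartN
    rw [if_pos h, if_neg (by omega)]
  · rw [if_pos (by omega), PySem.List.pyRange_one, List.foldl_map]
    have e2 : (((m.length : Nat) : Int) - 0).toNat = m.length := by omega
    rw [e2]
    simp only [zero_add]
    rw [pv_rep_zero]
    have aux : ∀ k, k ≤ m.length →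
        (List.range k).foldl (fun t (a : Nat) =>
            pvSetCell t (a : Int) (a : Int) (PySem.List.pyGetD m (a : Int) 0))
          (pvMk m.length (fun _ _ => 0))
        = pvMk m.length (fun a b => if a = b ∧ a < k then m.getD a 0 else 0) := by
      intro k
      induction k with
      | zero =>
        intro _
        simp only [List.range_zero, List.foldl_nil]
        refine pvMk_congr ?_
        intro a b _ _
        rw [if_neg (by omega)]
      | succ k ih =>
        intro hk
        rw [List.range_succ, List.foldl_append, ih (by omega), List.foldl_cons, List.foldl_nil]
        rw [PySem.List.pyGetD_natCast]
        rw [pvSetCell_mk _ (by omega) (by omega)]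
        refine pvMk_congr ?_
        intro a b ha hb
        by_cases h1 : a = k ∧ b = k
        · obtain ⟨rfl, rfl⟩ := h1
          rw [if_pos ⟨rfl, rfl⟩, if_pos (by omega)]
        · rw [if_neg h1]
          by_cases h2 : a = b ∧ a < k
          · rw [if_pos h2, if_pos (by omega)]
          · rw [if_neg h2, if_neg (by omega)]
    rw [aux m.length le_rfl]
    refine pvMk_congr ?_
    intro a b ha hb
    unfold pvCell pvStartN
    rw [if_neg h]
    by_cases h1 : a = b ∧ a < m.length
    · obtain ⟨rfl, -⟩ := h1
      rw [if_pos ⟨rfl, by omega⟩, if_pos (by omega)]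
      have g1 : a - a = 0 := by omega
      rw [g1]
      rfl
    · rw [if_neg h1, if_neg (by omega)]

lemma pv_outer (m : List Int) (k : Nat) (hk : k ≤ pvK m) :
    (List.range k).foldl (fun t (kk : Nat) =>
        (PySem.List.pyRange 0 ((m.length : Int) - ((pvStartN m + 2 * kk : Nat) : Int)) 1).foldl
          (fun t i =>
            let j := i + ((pvStartN m + 2 * kk : Nat) : Int)
            let ci := PySem.List.pyGetD m i 0 + maximo_tras_eleccion_mateo m t (i + 1) j
            let cj := PySem.List.pyGetD m j 0 + maximo_tras_eleccion_mateo m t i (j - 1)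
            pvSetCell t i j (max ci cj)) t)
      (pvMk m.length (pvCell m (pvStartN m)))
    = pvMk m.length (pvCell m (pvStartN m + 2 * k)) := by
  induction k with
  | zero => simp
  | succ k ih =>
    rw [List.range_succ, List.foldl_append, ih (by omega), List.foldl_cons, List.foldl_nil]
    rw [pv_inner m (pvStartN m + 2 * k) (by unfold pvStartN; split <;> omega)
      (pv_bound_lt m (by omega)) (by have := pvStart_par m; omega)]
    have g1 : pvStartN m + 2 * (k + 1) = pvStartN m + 2 * k + 2 := by ring
    rw [g1]

theorem pv_thmA (m : List Int) :
    max_acumulados_sophia m = pvMk m.length (pvCell m (pvStartN m + 2 * pvK m)) := by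
  simp only [max_acumulados_sophia]
  rw [pv_init]
  have hs : (if ((m.length : Int) % 2 == 0) = true then (1 : Int) else 2)
      = ((pvStartN m : Nat) : Int) := by
    by_cases h : m.length % 2 = 0
    · rw [if_pos (by simp [beq_iff_eq]; omega)]
      unfold pvStartN; rw [if_pos h]; norm_num
    · rw [if_neg (by simp [beq_iff_eq]; omega)]
      unfold pvStartN; rw [if_neg h]; norm_num
  rw [hs, pv_range2, List.foldl_map]
  exact pv_outer m (pvK m) le_rfl

-- ===== B side =====

-- memo coherence: every entry stores the spec value of an in-range upper cell
def pvGood (m : List Int) (memo : PySem.Dict (Int × Int) Int) : Prop :=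
  ∀ p q v, memo.get? (p, q) = some v →
    ∃ a b : Nat, p = (a : Int) ∧ q = (b : Int) ∧ a < b ∧ b < m.length ∧ v = pvSpecD m (b - a) a

-- the none-branch of pvValor, named so the proof can `show` it
def pvStep (m : List Int) (n : Int) (memo : PySem.Dict (Int × Int) Int) (i j : Int) :
    Int × PySem.Dict (Int × Int) Int :=
  let pq1 := pvTras m n (i + 1) j
  let r1 := pvValor m n memo pq1.1 pq1.2
  let pq2 := pvTras m n i (j - 1)
  let r2 := pvValor m n r1.2 pq2.1 pq2.2
  let v := max (PySem.List.pyGetD m i 0 + r1.1) (PySem.List.pyGetD m j 0 + r2.1)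
  (v, r2.2.insert (i, j) v)

lemma pvGood_empty (m : List Int) : pvGood m PySem.Dict.empty := by
  intro p q v h
  rw [PySem.Dict.get?_empty] at h
  exact absurd h (by simp)

lemma pvGood_insert (m : List Int) (memo : PySem.Dict (Int × Int) Int) (hg : pvGood m memo)
    (a b : Nat) (hab : a < b) (hb : b < m.length) (v : Int) (hv : v = pvSpecD m (b - a) a) :
    pvGood m (memo.insert ((a : Int), (b : Int)) v) := by
  intro p q w hw
  rw [PySem.Dict.get?_insert] at hw
  split_ifs at hw with h
  · obtain ⟨h1, h2⟩ := Prod.mk.injEq .. ▸ h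
    cases hw
    exact ⟨a, b, h1, h2, hab, hb, hv⟩
  · exact hg p q w hw

lemma pvValor_lt (m : List Int) (n : Int) (memo : PySem.Dict (Int × Int) Int) (i j : Int)
    (h : j < i) : pvValor m n memo i j = (0, memo) := by
  rw [pvValor, if_pos h]

-- a pvValor call through pvTras lands on the pvAfterRow cell of the next gap
lemma pvValor_tras (m : List Int) (p q : Nat) (hpq : p < q) (hq : q < m.length)
    (memo : PySem.Dict (Int × Int) Int) (hg : pvGood m memo)
    (IH : ∀ (a b : Nat) (memo' : PySem.Dict (Int × Int) Int), b - a = q - p - 1 → a ≤ b →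
        b < m.length → pvGood m memo' →
        (pvValor m (m.length : Int) memo' (a : Int) (b : Int)).1 = pvSpecD m (q - p - 1) a ∧
        pvGood m (pvValor m (m.length : Int) memo' (a : Int) (b : Int)).2) :
    (pvValor m (m.length : Int) memo (pvTras m (m.length : Int) (p : Int) (q : Int)).1
        (pvTras m (m.length : Int) (p : Int) (q : Int)).2).1
      = pvSpecD m (q - p - 1) (pvAfterRow m p q) ∧
    pvGood m (pvValor m (m.length : Int) memo (pvTras m (m.length : Int) (p : Int) (q : Int)).1
        (pvTras m (m.length : Int) (p : Int) (q : Int)).2).2 := by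
  have hcond : ((p : Int) ≠ (m.length : Int) - 1) ↔ (p ≠ m.length - 1) := by omega
  unfold pvTras pvAfterRow
  simp only [PySem.List.pyGetD_natCast]
  by_cases hc : m.getD p 0 ≥ m.getD q 0 ∧ p ≠ m.length - 1
  · rw [if_pos (show m.getD p 0 ≥ m.getD q 0 ∧ (p : Int) ≠ (m.length : Int) - 1 from
        ⟨hc.1, hcond.mpr hc.2⟩), if_pos hc]
    dsimp only
    rw [show ((p : Int) + 1) = ((p + 1 : Nat) : Int) from by push_cast; ring]
    exact IH (p + 1) q memo (by omega) (by omega) hq hg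
  · rw [if_neg (fun hh => hc ⟨hh.1, hcond.mp hh.2⟩), if_neg hc]
    dsimp only
    rw [show ((q : Int) - 1) = ((q - 1 : Nat) : Int) from by omega]
    exact IH p (q - 1) memo (by omega) (by omega) (by omega) hg

lemma pvValor_spec (m : List Int) : ∀ d (a b : Nat) (memo : PySem.Dict (Int × Int) Int),
    b - a = d → a ≤ b → b < m.length → pvGood m memo →
    (pvValor m (m.length : Int) memo (a : Int) (b : Int)).1 = pvSpecD m d a ∧
    pvGood m (pvValor m (m.length : Int) memo (a : Int) (b : Int)).2 := by
  intro d
  induction d using Nat.strong_induction_on with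
  | _ d ih =>
    intro a b memo hd hab hb hg
    rcases Nat.eq_or_lt_of_le hab with heq | hlt
    · subst heq
      have hd0 : d = 0 := by omega
      subst hd0
      rw [pvValor, if_neg (by omega), if_pos rfl]
      exact ⟨by simp [pvSpecD], hg⟩
    · rw [pvValor, if_neg (by omega), if_neg (by omega)]
      cases hmem : memo.get? (((a : Nat) : Int), ((b : Nat) : Int)) with
      | some v =>
        obtain ⟨a', b', hpa, hqb, hab', hb', hv⟩ := hg _ _ _ hmem
        have haa : a = a' := by omega
        have hbb : b = b' := by omega
        subst haa
        subst hbb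
        exact ⟨hd ▸ hv, hg⟩
      | none =>
        show (pvStep m (m.length : Int) memo (a : Int) (b : Int)).1 = pvSpecD m d a ∧
            pvGood m (pvStep m (m.length : Int) memo (a : Int) (b : Int)).2
        rcases Nat.lt_or_ge d 2 with h2 | h2
        · -- d = 1 : both inner reads fall below the diagonal and give 0
          have hd1 : d = 1 := by omega
          subst hd1
          have hb1 : b = a + 1 := by omega
          subst hb1
          simp only [pvStep]
          have g1 := pvTras_gap m (m.length : Int) ((a : Int) + 1) ((a + 1 : Nat) : Int)
          rw [pvValor_lt m (m.length : Int) memo _ _ (by omega :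
            (pvTras m (m.length : Int) ((a : Int) + 1) ((a + 1 : Nat) : Int)).2 <
            (pvTras m (m.length : Int) ((a : Int) + 1) ((a + 1 : Nat) : Int)).1)]
          have g2 := pvTras_gap m (m.length : Int) (a : Int) (((a + 1 : Nat) : Int) - 1)
          rw [pvValor_lt m (m.length : Int) ((0 : Int), memo).2 _ _ (by omega :
            (pvTras m (m.length : Int) (a : Int) (((a + 1 : Nat) : Int) - 1)).2 <
            (pvTras m (m.length : Int) (a : Int) (((a + 1 : Nat) : Int) - 1)).1)]
          dsimp only
          have hval : max (PySem.List.pyGetD m (a : Int) 0 + (0 : Int))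
              (PySem.List.pyGetD m ((a + 1 : Nat) : Int) 0 + (0 : Int)) = pvSpecD m 1 a := by
            simp only [PySem.List.pyGetD_natCast]
            rfl
          exact ⟨hval, pvGood_insert m memo hg a (a + 1) (by omega) hb _
            (by rw [show a + 1 - a = 1 from by omega]; exact hval)⟩
        · -- d = e + 2 : both inner reads are spec values of gap e via the IH
          obtain ⟨e, rfl⟩ : ∃ e, d = e + 2 := ⟨d - 2, by omega⟩
          have hbe : b = a + e + 2 := by omega
          subst hbe
          simp only [pvStep]
          rw [show ((a : Int) + 1) = ((a + 1 : Nat) : Int) from by push_cast; ring]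
          have IH1 : ∀ (a' b' : Nat) (memo' : PySem.Dict (Int × Int) Int),
              b' - a' = (a + e + 2) - (a + 1) - 1 → a' ≤ b' → b' < m.length → pvGood m memo' →
              (pvValor m (m.length : Int) memo' (a' : Int) (b' : Int)).1
                  = pvSpecD m ((a + e + 2) - (a + 1) - 1) a' ∧
              pvGood m (pvValor m (m.length : Int) memo' (a' : Int) (b' : Int)).2 := by
            rw [show (a + e + 2) - (a + 1) - 1 = e from by omega]
            exact fun a' b' memo' h1 hab' hb' hg' => ih e (by omega) a' b' memo' h1 hab' hb' hg'
          obtain ⟨hv1, hg1⟩ := pvValor_tras m (a + 1) (a + e + 2) (by omega) (by omega) memo hg IH1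
          rw [hv1]
          rw [show (((a + e + 2 : Nat) : Int) - 1) = ((a + e + 1 : Nat) : Int) from by
            push_cast; ring]
          have IH2 : ∀ (a' b' : Nat) (memo' : PySem.Dict (Int × Int) Int),
              b' - a' = (a + e + 1) - a - 1 → a' ≤ b' → b' < m.length → pvGood m memo' →
              (pvValor m (m.length : Int) memo' (a' : Int) (b' : Int)).1
                  = pvSpecD m ((a + e + 1) - a - 1) a' ∧
              pvGood m (pvValor m (m.length : Int) memo' (a' : Int) (b' : Int)).2 := by
            rw [show (a + e + 1) - a - 1 = e from by omega]
            exact fun a' b' memo' h1 hab' hb' hg' => ih e (by omega) a' b' memo' h1 hab' hb' hg'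
          obtain ⟨hv2, hg2⟩ := pvValor_tras m a (a + e + 1) (by omega) (by omega) _ hg1 IH2
          rw [hv2]
          have hval : max (PySem.List.pyGetD m (a : Int) 0 +
                pvSpecD m ((a + e + 2) - (a + 1) - 1) (pvAfterRow m (a + 1) (a + e + 2)))
              (PySem.List.pyGetD m ((a + e + 2 : Nat) : Int) 0 +
                pvSpecD m ((a + e + 1) - a - 1) (pvAfterRow m a (a + e + 1)))
              = pvSpecD m (e + 2) a := by
            simp only [PySem.List.pyGetD_natCast]
            rw [show (a + e + 2) - (a + 1) - 1 = e from by omega,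
              show (a + e + 1) - a - 1 = e from by omega]
            rfl
          exact ⟨hval, pvGood_insert m _ hg2 a (a + e + 2) (by omega) (by omega) _
            (by rw [show a + e + 2 - a = e + 2 from by omega]; exact hval)⟩

-- B's comprehension, one cell step / one row step (shapes of the unfolded alt)
def pvInnerF (m : List Int) (i : Nat) (st2 : List Int × PySem.Dict (Int × Int) Int) (jj : Nat) :
    List Int × PySem.Dict (Int × Int) Int :=
  if (i : Int) ≤ (jj : Int) ∧
      PySem.Int.mod ((jj : Int) - (i : Int)) 2 ≠ PySem.Int.mod ((m.length : Int)) 2 then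
    (st2.1 ++ [(pvValor m (m.length : Int) st2.2 (i : Int) (jj : Int)).1],
     (pvValor m (m.length : Int) st2.2 (i : Int) (jj : Int)).2)
  else (st2.1 ++ [(0 : Int)], st2.2)

def pvOuterF (m : List Int) (st : List (List Int) × PySem.Dict (Int × Int) Int) (ii : Nat) :
    List (List Int) × PySem.Dict (Int × Int) Int :=
  (st.1 ++ [((List.range m.length).foldl (pvInnerF m ii) ([], st.2)).1],
   ((List.range m.length).foldl (pvInnerF m ii) ([], st.2)).2)

lemma pv_row_fold (m : List Int) (i : Nat) : ∀ k, k ≤ m.length →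
    ∀ (acc : List Int) (memo : PySem.Dict (Int × Int) Int), pvGood m memo →
    ∃ memo', (List.range k).foldl (pvInnerF m i) (acc, memo)
      = (acc ++ (List.range k).map (fun j => pvCell m (pvStartN m + 2 * pvK m) i j), memo')
      ∧ pvGood m memo' := by
  intro k
  induction k with
  | zero => exact fun _ acc memo hg => ⟨memo, by simp, hg⟩
  | succ k ih =>
    intro hk acc memo hg
    obtain ⟨mk', hEq, hgk⟩ := ih (by omega) acc memo hg
    rw [List.range_succ, List.foldl_append, hEq, List.foldl_cons, List.foldl_nil]
    unfold pvInnerF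
    have hmod : ∀ x : Int, PySem.Int.mod x 2 = x % 2 :=
      fun x => PySem.Int.mod_eq_emod_of_pos (by norm_num)
    by_cases hc : i ≤ k ∧ (k - i) % 2 ≠ m.length % 2
    · rw [if_pos (show (i : Int) ≤ (k : Int) ∧
          PySem.Int.mod ((k : Int) - (i : Int)) 2 ≠ PySem.Int.mod ((m.length : Int)) 2 from
          ⟨by omega, by rw [hmod, hmod]; omega⟩)]
      obtain ⟨hv, hg'⟩ := pvValor_spec m (k - i) i k mk' rfl hc.1 (by omega) hgk
      refine ⟨_, ?_, hg'⟩
      dsimp only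
      rw [hv, List.map_append, List.map_cons, List.map_nil,
        pvCell_at m _ i k hc.1 hc.2 (pv_gap_lt m hc.1 (by omega)), List.append_assoc]
    · rw [if_neg (fun hh => hc ⟨by omega, by
        have h1 := hh.2
        rw [hmod, hmod] at h1
        omega⟩)]
      refine ⟨mk', ?_, hgk⟩
      dsimp only
      have h0 : pvCell m (pvStartN m + 2 * pvK m) i k = 0 := by
        unfold pvCell
        rw [if_neg (fun hh => hc ⟨hh.1, hh.2.1⟩)]
      rw [List.map_append, List.map_cons, List.map_nil, h0, List.append_assoc]

lemma pv_outer_fold (m : List Int) : ∀ k, k ≤ m.length →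
    ∀ (acc : List (List Int)) (memo : PySem.Dict (Int × Int) Int), pvGood m memo →
    ∃ memo', (List.range k).foldl (pvOuterF m) (acc, memo)
      = (acc ++ (List.range k).map
          (fun i => (List.range m.length).map (fun j => pvCell m (pvStartN m + 2 * pvK m) i j)),
         memo')
      ∧ pvGood m memo' := by
  intro k
  induction k with
  | zero => exact fun _ acc memo hg => ⟨memo, by simp, hg⟩
  | succ k ih =>
    intro hk acc memo hg
    obtain ⟨mk', hEq, hgk⟩ := ih (by omega) acc memo hg
    rw [List.range_succ, List.foldl_append, hEq, List.foldl_cons, List.foldl_nil]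
    obtain ⟨m2, h2, hg2⟩ := pv_row_fold m k m.length le_rfl [] mk' hgk
    refine ⟨m2, ?_, hg2⟩
    unfold pvOuterF
    rw [h2]
    dsimp only
    rw [List.nil_append, List.map_append, List.map_cons, List.map_nil, List.append_assoc]

theorem pv_thmB (m : List Int) :
    max_acumulados_sophia_alt m = pvMk m.length (pvCell m (pvStartN m + 2 * pvK m)) := by
  simp only [max_acumulados_sophia_alt, PySem.List.pyRange_one, List.foldl_map, zero_add,
    Int.sub_zero, Int.toNat_natCast]
  obtain ⟨memo', hEq, -⟩ := pv_outer_fold m m.length le_rfl [] PySem.Dict.empty (pvGood_empty m)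
  have hfst := congrArg Prod.fst hEq
  exact hfst.trans (by simp [pvMk])

-- ===== VERDICT (by name: the statement is the Claim_ definition above) =====
theorem max_acumulados_sophia_spec : Claim_equal_max_acumulados_sophia := by
  intro monedas _
  unfold Spec_max_acumulados_sophia
  rw [pv_thmA monedas, pv_thmB monedas]
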